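-- pv_equiv track=rewrite | github.com/alexandrebatista84/fundamentos-programacao | Aula Prática 6/Exercicio2.py | apenas_digitos_impares
-- ===== SOURCE A (Python) =====
-- def apenas_digitos_impares(a):
--
--     if a==0:
--         return 0
--     else:
--         if ((a%10%2)!=0):
--             return(a%10+10*apenas_digitos_impares(a//10))
--         else:
--             return(apenas_digitos_impares(a//10))
-- ===== SOURCE B (Python) =====
-- def apenas_digitos_impares(a):
--     # Iterative digit-peeling with a positional multiplier instead of recursion.
--     result = 0
--     mult = 1
--     while a != 0:
--         d = a % 10
--         a //= 10
--         if d % 2 != 0: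
--             result += d * mult
--             mult *= 10
--     return result
-- ===== Notes on version B (the rewrite author's own statement) =====
-- stated objective: alternative
-- what changed: Replaces the recursion with an explicit while-loop that peels digits LSB-first, keeping an accumulator and a positional multiplier instead of rebuilding the number on the way back up the call stack.
import Mathlib
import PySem

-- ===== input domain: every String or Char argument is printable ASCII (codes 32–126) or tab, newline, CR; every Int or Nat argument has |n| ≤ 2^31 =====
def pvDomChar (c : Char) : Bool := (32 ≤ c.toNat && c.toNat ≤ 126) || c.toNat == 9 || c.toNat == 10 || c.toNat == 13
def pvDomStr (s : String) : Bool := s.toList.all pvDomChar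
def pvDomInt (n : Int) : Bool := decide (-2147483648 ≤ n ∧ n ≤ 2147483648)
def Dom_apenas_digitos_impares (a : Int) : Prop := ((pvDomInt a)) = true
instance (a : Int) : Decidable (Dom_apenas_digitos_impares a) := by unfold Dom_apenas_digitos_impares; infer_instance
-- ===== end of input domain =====

-- B keeps only the odd digits of a via an iterative LSB-first loop with a positional
-- multiplier, instead of A's recursion; same value on every nonnegative input.

-- ===== PORT A =====
-- The 'a < 0' guard only makes the recursion total: Python A never returns on a < 0
-- (infinite recursion → RecursionError), so Pre_ excludes those inputs.
def apenas_digitos_impares (a : Int) : Int :=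
  if a = 0 then 0
  else if a < 0 then 0
  else if PySem.Int.mod (PySem.Int.mod a 10) 2 ≠ 0 then
    PySem.Int.mod a 10 + 10 * apenas_digitos_impares (PySem.Int.floordiv a 10)
  else
    apenas_digitos_impares (PySem.Int.floordiv a 10)
termination_by a.toNat
decreasing_by
  all_goals
    rw [PySem.Int.floordiv_eq_ediv_of_pos (by omega)]
    omega

-- ===== PORT B =====
-- The 'a < 0' guard only makes the loop total: Python B's 'while a != 0' never
-- terminates for a < 0 (a //= 10 stalls at -1), so Pre_ excludes those inputs.
def apenasAltLoop (a result mult : Int) : Int :=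
  if a = 0 then result
  else if a < 0 then result
  else
    let d := PySem.Int.mod a 10
    let a' := PySem.Int.floordiv a 10
    if PySem.Int.mod d 2 ≠ 0 then apenasAltLoop a' (result + d * mult) (mult * 10)
    else apenasAltLoop a' result mult
termination_by a.toNat
decreasing_by
  all_goals
    rw [PySem.Int.floordiv_eq_ediv_of_pos (by omega)]
    omega

def apenas_digitos_impares_alt (a : Int) : Int :=
  apenasAltLoop a 0 1

-- ===== PRECONDITION & SPEC =====
-- Pre_ excludes a < 0, where Python A raises RecursionError (and B's loop never terminates).
def Pre_apenas_digitos_impares (a : Int) : Prop := 0 ≤ a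
instance (a : Int) : Decidable (Pre_apenas_digitos_impares a) := by unfold Pre_apenas_digitos_impares; infer_instance
def pvWitness_apenas_digitos_impares : Int := (13579)

def Spec_apenas_digitos_impares (a : Int) (out : Int) : Prop := out = apenas_digitos_impares_alt a
instance (a : Int) (out : Int) : Decidable (Spec_apenas_digitos_impares a out) := by unfold Spec_apenas_digitos_impares; infer_instance

-- ===== CLAIM (what is proved, stated in full; the proofs are below) =====
def Claim_equal_apenas_digitos_impares : Prop := ∀ (a : Int), Dom_apenas_digitos_impares a → Pre_apenas_digitos_impares a → Spec_apenas_digitos_impares a (apenas_digitos_impares a)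

-- ===== LEMMAS AND PROOFS =====

-- Loop invariant: for 0 ≤ a, the loop adds mult * (A's value) onto the accumulator.
theorem apenasAltLoop_inv (n : Nat) (a result mult : Int) (ha : 0 ≤ a) (hn : a.toNat ≤ n) :
    apenasAltLoop a result mult = result + mult * apenas_digitos_impares a := by
  induction n generalizing a result mult with
  | zero =>
    have : a = 0 := by omega
    subst this
    simp [apenasAltLoop, apenas_digitos_impares]
  | succ n ih =>
    by_cases h0 : a = 0
    · subst h0; simp [apenasAltLoop, apenas_digitos_impares]
    · have hpos : 0 < a := by omega
      have hq : PySem.Int.floordiv a 10 = a / 10 := PySem.Int.floordiv_eq_ediv_of_pos (by omega)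
      have hq0 : 0 ≤ PySem.Int.floordiv a 10 := by rw [hq]; positivity
      have hqn : (PySem.Int.floordiv a 10).toNat ≤ n := by rw [hq]; omega
      rw [apenasAltLoop, apenas_digitos_impares]
      simp only [if_neg h0, if_neg (by omega : ¬ a < 0)]
      by_cases hodd : PySem.Int.mod (PySem.Int.mod a 10) 2 ≠ 0
      · simp only [if_pos hodd, ih _ _ _ hq0 hqn]
        ring
      · simp only [if_neg hodd, ih _ _ _ hq0 hqn]

-- ===== VERDICT (by name: the statement is the Claim_ definition above) =====
theorem apenas_digitos_impares_spec : Claim_equal_apenas_digitos_impares := by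
  intro a _ hpre
  unfold Spec_apenas_digitos_impares apenas_digitos_impares_alt
  rw [apenasAltLoop_inv a.toNat a 0 1 hpre (le_refl _)]
  ring
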